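-- pv_equiv track=rewrite | github.com/priyankang29/Programs | Convert to Strictly increasing integer array with minimum changes.py | minRemove
-- ===== SOURCE A (Python) =====
-- def minRemove(arr, n):
-- 	LIS = [0 for i in range(n)]
-- 	len = 0
--
-- 	# Mark all elements of LIS as 1
-- 	for i in range(n):
-- 		LIS[i] = 1
--
-- 	# Find LIS of array
-- 	for i in range(1, n):
--
-- 		for j in range(i):
-- 			if (arr[i] > arr[j] and (i-j)<=(arr[i]-arr[j]) ):
-- 				LIS[i] = max(LIS[i], LIS[j] + 1)
--
-- 		len = max(len, LIS[i])
--
-- 	# Return min changes for array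
-- 	# to strictly increasing
-- 	return (n - len)
-- ===== SOURCE B (Python) =====
-- def minRemove(arr, n):
--     # Patience sorting: length of the longest non-decreasing subsequence of arr[i]-i,
--     # maintained as the sorted list of minimal tail values, binary-searched per element.
--     tails = []
--     for i in range(n):
--         x = arr[i] - i
--         lo, hi = 0, len(tails)
--         while lo < hi:
--             mid = (lo + hi) // 2
--             if tails[mid] <= x:
--                 lo = mid + 1
--             else:
--                 hi = mid
--         if lo == len(tails):
--             tails.append(x)
--         else:
--             tails[lo] = x
--     return n - len(tails)
-- ===== Notes on version B (the rewrite author's own statement) =====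
-- stated objective: faster
-- what changed: Replaced the O(n^2) quadratic LIS dynamic programming with patience sorting on arr[i]-i: a sorted list of minimal tail values updated by binary search, one pass, O(n log n).
-- intended difference: For n == 1 A returns 1 (its max over LIS[1..n-1] is empty and misses LIS[0], so it reports one change for a single-element array), while B returns 0, the intended number of changes for a one-element array. — e.g. on minRemove([5], 1): A returns 1, B returns 0
-- outside the precondition, e.g. on minRemove([], 1): A returns 1, B raises IndexError
import Mathlib
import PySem

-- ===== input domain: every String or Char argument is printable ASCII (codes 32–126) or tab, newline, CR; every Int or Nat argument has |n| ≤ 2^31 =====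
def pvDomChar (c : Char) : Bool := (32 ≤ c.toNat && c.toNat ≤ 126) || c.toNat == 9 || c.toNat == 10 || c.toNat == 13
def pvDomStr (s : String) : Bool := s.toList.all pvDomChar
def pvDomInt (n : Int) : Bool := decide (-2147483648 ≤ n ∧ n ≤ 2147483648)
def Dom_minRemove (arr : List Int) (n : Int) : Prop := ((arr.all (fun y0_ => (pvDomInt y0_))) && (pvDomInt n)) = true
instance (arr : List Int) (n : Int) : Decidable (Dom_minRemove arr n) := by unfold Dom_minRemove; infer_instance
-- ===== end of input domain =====

-- B replaces A's quadratic LIS dynamic programming by patience sorting (a sorted list of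
-- minimal tail values updated by binary search) on arr[i]-i; for n == 1 A returns 1 where B
-- returns the intended 0 (stated as D_minRemove below).

-- ===== PORT A =====
-- Literal transliteration of A. All list indices reached under Pre_ are in range, so the
-- total forms pyGetD/pySetD are exact there.
def minRemove (arr : List Int) (n : Int) : Int :=
  -- LIS = [0 for i in range(n)]
  let LIS : List Int := (PySem.List.pyRange 0 n 1).map (fun _ => 0)
  -- for i in range(n): LIS[i] = 1
  let LIS := (PySem.List.pyRange 0 n 1).foldl (fun L i => PySem.List.pySetD L i 1) LIS
  -- len = 0; for i in range(1, n): (inner j-loop) ; len = max(len, LIS[i])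
  let st := (PySem.List.pyRange 1 n 1).foldl (fun (st : List Int × Int) i =>
    let L := (PySem.List.pyRange 0 i 1).foldl (fun L j =>
      if PySem.List.pyGetD arr i 0 > PySem.List.pyGetD arr j 0 ∧
         i - j ≤ PySem.List.pyGetD arr i 0 - PySem.List.pyGetD arr j 0 then
        PySem.List.pySetD L i (max (PySem.List.pyGetD L i 0) (PySem.List.pyGetD L j 0 + 1))
      else L) st.1
    (L, max st.2 (PySem.List.pyGetD L i 0))) (LIS, 0)
  n - st.2

-- ===== PORT B =====
-- Source B's hand-written binary search `while lo < hi: mid = (lo+hi)//2 ...`, as structural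
-- recursion on a fuel argument; fuel = len(tails) bounds the halving loop (totality guard only).
def minRemoveBisect (tails : List Int) (x : Int) : Nat → Int → Int → Int
  | 0, lo, _ => lo
  | Nat.succ f, lo, hi =>
    if lo < hi then
      let mid := PySem.Int.floordiv (lo + hi) 2
      if PySem.List.pyGetD tails mid 0 ≤ x then minRemoveBisect tails x f (mid + 1) hi
      else minRemoveBisect tails x f lo mid
    else lo

def minRemove_alt (arr : List Int) (n : Int) : Int :=
  let tails := (PySem.List.pyRange 0 n 1).foldl (fun t i =>
    let x := PySem.List.pyGetD arr i 0 - i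
    let lo := minRemoveBisect t x t.length 0 (t.length : Int)
    if lo = (t.length : Int) then t ++ [x] else PySem.List.pySetD t lo x) ([] : List Int)
  n - (tails.length : Int)

-- ===== PRECONDITION & SPEC =====
-- Pre_ excludes n > len(arr): there the Python raises IndexError (A for n ≥ 2, B for n ≥ 1;
-- at the single point arr = [], n = 1 A still returns 1 but B itself raises).
def Pre_minRemove (arr : List Int) (n : Int) : Prop := n ≤ (arr.length : Int) ∨ n ≤ 0
instance (arr : List Int) (n : Int) : Decidable (Pre_minRemove arr n) := by
  unfold Pre_minRemove; infer_instance
def pvWitness_minRemove : List Int × Int := ([3, 1, 4, 2], 4)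

-- For n == 1 A returns 1 (its running max skips LIS[0], counting one change for a
-- single-element array), while B returns the intended 0: a one-element array is already
-- strictly increasing.
def D_minRemove (arr : List Int) (n : Int) : Prop := n = 1
instance (arr : List Int) (n : Int) : Decidable (D_minRemove arr n) := by
  unfold D_minRemove; infer_instance

def Spec_minRemove (arr : List Int) (n : Int) (out : Int) : Prop :=
  ¬ D_minRemove arr n → out = minRemove_alt arr n
instance (arr : List Int) (n : Int) (out : Int) : Decidable (Spec_minRemove arr n out) := by
  unfold Spec_minRemove; infer_instance

def pvDiffWitness_minRemove : List Int × Int := ([5], 1)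
def pvDiffWitnessOut_minRemove : Int × Int := (1, 0)

-- ===== CLAIM (what is proved, stated in full; the proofs are below) =====
def Claim_unchanged_minRemove : Prop := ∀ (arr : List Int) (n : Int), Dom_minRemove arr n →
  Pre_minRemove arr n → Spec_minRemove arr n (minRemove arr n)
def Claim_changed_minRemove : Prop :=
  Dom_minRemove (pvDiffWitness_minRemove.1) (pvDiffWitness_minRemove.2) ∧
  Pre_minRemove (pvDiffWitness_minRemove.1) (pvDiffWitness_minRemove.2) ∧
  D_minRemove (pvDiffWitness_minRemove.1) (pvDiffWitness_minRemove.2) ∧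
  minRemove (pvDiffWitness_minRemove.1) (pvDiffWitness_minRemove.2) = pvDiffWitnessOut_minRemove.1 ∧
  minRemove_alt (pvDiffWitness_minRemove.1) (pvDiffWitness_minRemove.2) = pvDiffWitnessOut_minRemove.2 ∧
  pvDiffWitnessOut_minRemove.1 ≠ pvDiffWitnessOut_minRemove.2
def Claim_exact_minRemove : Prop := ∀ (arr : List Int) (n : Int), Dom_minRemove arr n →
  Pre_minRemove arr n → D_minRemove arr n → minRemove arr n ≠ minRemove_alt arr n

-- ===== LEMMAS AND PROOFS =====
-- Joint plan: both programs are reduced to folds over bs = [arr[i] - i : i < n].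
-- A computes the classical LIS DP (pvDstep) keeping the max of LIS[1..]; B is patience
-- sorting (pvPstep).  The invariant pvInv ties them: the tail list of B counts, below every
-- threshold v, exactly the best DP value among elements ≤ v.

def pvCnt (t : List Int) (v : Int) : Nat := t.countP (fun y => decide (y ≤ v))
def pvMLE (s : List (Int × Int)) (v : Int) : Int :=
  (s.filter (fun p => decide (p.1 ≤ v))).foldl (fun m p => max m p.2) 0
def pvMd (s : List (Int × Int)) : Int := s.foldl (fun m p => max m p.2) 0
def pvTmax (s : List (Int × Int)) : Int := (s.drop 1).foldl (fun m p => max m p.2) 0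
def pvDstep (s : List (Int × Int)) (x : Int) : List (Int × Int) := s ++ [(x, 1 + pvMLE s x)]
def pvPstep (t : List Int) (x : Int) : List Int :=
  if pvCnt t x = t.length then t ++ [x] else t.set (pvCnt t x) x
def pvBs (arr : List Int) (n : Int) : List Int :=
  (PySem.List.pyRange 0 n 1).map (fun i => PySem.List.pyGetD arr i 0 - i)
def pvSf (arr : List Int) (n : Int) (i : Nat) : List (Int × Int) :=
  ((pvBs arr n).take i).foldl pvDstep []
def pvInv (s : List (Int × Int)) (t : List Int) : Prop :=
  t.Pairwise (· ≤ ·) ∧ (∀ y ∈ t, ∃ p ∈ s, p.1 = y) ∧ ∀ v : Int, (pvCnt t v : Int) = pvMLE s v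

theorem pvCnt_iff (t : List Int) (hs : t.Pairwise (· ≤ ·)) (v : Int) (j : Nat)
    (hj : j < t.length) : t[j] ≤ v ↔ j < pvCnt t v := by
  induction t generalizing j with
  | nil => simp at hj
  | cons a t ih =>
    have ha : ∀ y ∈ t, a ≤ y := (List.pairwise_cons.mp hs).1
    have hst : t.Pairwise (· ≤ ·) := (List.pairwise_cons.mp hs).2
    by_cases hav : a ≤ v
    · have hc : pvCnt (a :: t) v = pvCnt t v + 1 := by simp [pvCnt, hav]
      rw [hc]
      cases j with
      | zero => simpa using hav
      | succ j =>
        simp only [List.getElem_cons_succ]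
        rw [ih hst j (by simpa using hj)]
        omega
    · have hz : pvCnt t v = 0 := by
        simp only [pvCnt, List.countP_eq_zero]
        intro y hy
        simp only [decide_eq_true_eq, not_le]
        by_contra hyv
        exact hav (le_trans (ha y hy) (not_lt.mp hyv))
      have hc : pvCnt (a :: t) v = 0 := by
        simp [pvCnt, hav]; simpa [pvCnt] using hz
      rw [hc]
      cases j with
      | zero => simpa using hav
      | succ j =>
        simp only [List.getElem_cons_succ]
        constructor
        · intro hjv
          exact absurd (le_trans (ha _ (List.getElem_mem _)) hjv) hav
        · omega

theorem pvCnt_le_length (t : List Int) (v : Int) : pvCnt t v ≤ t.length :=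
  List.countP_le_length

theorem pvMLE_nonneg (s : List (Int × Int)) (v : Int) : 0 ≤ pvMLE s v :=
  (PySem.List.le_foldl_max_int _ Prod.snd 0).1

theorem pvMLE_dstep (s : List (Int × Int)) (x v : Int) :
    pvMLE (pvDstep s x) v = if x ≤ v then max (pvMLE s v) (1 + pvMLE s x) else pvMLE s v := by
  simp only [pvMLE, pvDstep, List.filter_append, List.foldl_append]
  split_ifs with h <;> simp [h]

theorem pvCnt_mono (t : List Int) {u v : Int} (h : u ≤ v) : pvCnt t u ≤ pvCnt t v := by
  refine List.countP_mono_left ?_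
  intro a _ ha
  simp only [decide_eq_true_eq] at *
  omega

theorem pvCnt_append (t : List Int) (x v : Int) :
    pvCnt (t ++ [x]) v = pvCnt t v + (if x ≤ v then 1 else 0) := by
  simp only [pvCnt, List.countP_append, List.countP_cons, List.countP_nil]
  by_cases h : x ≤ v <;> simp [h]

theorem pvCnt_set (t : List Int) (k : Nat) (x v : Int) (hk : k < t.length) :
    (pvCnt (t.set k x) v : Int)
      = pvCnt t v + (if x ≤ v then 1 else 0) - (if t[k] ≤ v then 1 else 0) := by
  have hd : t.drop k = t[k] :: t.drop (k + 1) := List.drop_eq_getElem_cons hk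
  have ht : t = t.take k ++ t[k] :: t.drop (k + 1) := by
    conv_lhs => rw [← List.take_append_drop k t, hd]
  have e1 : t.set k x = t.take k ++ x :: t.drop (k + 1) := by
    rw [List.set_eq_take_append_cons_drop]; simp [hk]
  have e2 : pvCnt t v
      = pvCnt (t.take k) v + (if t[k] ≤ v then 1 else 0) + pvCnt (t.drop (k + 1)) v := by
    conv_lhs => rw [ht]
    simp only [pvCnt, List.countP_append, List.countP_cons, List.countP_nil]
    by_cases hb : t[k] ≤ v <;> simp [hb] <;> omega
  have e3 : pvCnt (t.set k x) v
      = pvCnt (t.take k) v + (if x ≤ v then 1 else 0) + pvCnt (t.drop (k + 1)) v := by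
    rw [e1]
    simp only [pvCnt, List.countP_append, List.countP_cons, List.countP_nil]
    by_cases hb : x ≤ v <;> simp [hb] <;> omega
  rw [e3, e2]
  split_ifs <;> push_cast <;> omega

theorem pvPstep_pairwise (t : List Int) (x : Int) (hs : t.Pairwise (· ≤ ·)) :
    (pvPstep t x).Pairwise (· ≤ ·) := by
  unfold pvPstep
  split_ifs with h
  · rw [List.pairwise_append]
    refine ⟨hs, List.pairwise_singleton _ _, ?_⟩
    intro a ha b hb
    simp only [List.mem_singleton] at hb
    rw [hb]
    obtain ⟨j, hj, rfl⟩ := List.mem_iff_getElem.mp ha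
    exact (pvCnt_iff t hs x j hj).mpr (by omega)
  · rw [List.pairwise_iff_getElem]
    intro i j hi hj hij
    have hkl : pvCnt t x < t.length := lt_of_le_of_ne (pvCnt_le_length t x) h
    simp only [List.length_set] at hi hj
    rw [List.getElem_set, List.getElem_set]
    have hcj : pvCnt t x ≤ j → x < t[j] := fun hle => by
      have h1 := (pvCnt_iff t hs x j hj).not
      simp only [not_le, not_lt] at h1
      exact h1.mpr (by omega)
    split_ifs with h1 h2 h2
    · omega
    · exact le_of_lt (hcj (by omega))
    · exact (pvCnt_iff t hs x i hi).mpr (by omega)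
    · exact List.pairwise_iff_getElem.mp hs i j hi hj hij

theorem pvInv_step (s : List (Int × Int)) (t : List Int) (x : Int) (h : pvInv s t) :
    pvInv (pvDstep s x) (pvPstep t x) := by
  obtain ⟨hs, hm, hc⟩ := h
  refine ⟨pvPstep_pairwise t x hs, ?_, ?_⟩
  · intro y hy
    unfold pvPstep at hy
    have hmem : y ∈ t ∨ y = x := by
      split_ifs at hy with hk
      · rcases List.mem_append.mp hy with h1 | h1
        · exact Or.inl h1
        · simp only [List.mem_singleton] at h1; exact Or.inr h1
      · exact List.mem_or_eq_of_mem_set hy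
    rcases hmem with h1 | rfl
    · obtain ⟨p, hp, hpe⟩ := hm y h1
      exact ⟨p, List.mem_append_left _ hp, hpe⟩
    · exact ⟨(y, 1 + pvMLE s y), by simp [pvDstep], rfl⟩
  · intro v
    rw [pvMLE_dstep]
    unfold pvPstep
    by_cases hxv : x ≤ v
    · simp only [hxv, if_true]
      split_ifs with hk
      · rw [pvCnt_append]
        have h1 : pvCnt t v = t.length := by
          have h2 := pvCnt_mono t hxv
          have h3 := pvCnt_le_length t v
          omega
        rw [← hc v, ← hc x, hk, h1]
        simp only [hxv, if_true]
        push_cast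
        omega
      · have hkl : pvCnt t x < t.length := lt_of_le_of_ne (pvCnt_le_length t x) hk
        rw [pvCnt_set t _ x v hkl]
        rw [← hc v, ← hc x]
        simp only [hxv, if_true]
        by_cases htk : t[pvCnt t x] ≤ v
        · have h4 := (pvCnt_iff t hs v (pvCnt t x) hkl).mp htk
          simp only [htk, if_true]
          omega
        · have h2 : ¬ (pvCnt t x < pvCnt t v) := fun hlt =>
            htk ((pvCnt_iff t hs v (pvCnt t x) hkl).mpr hlt)
          have h3 := pvCnt_mono t hxv
          simp only [htk, if_false]
          omega
    · simp only [hxv, if_false]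
      split_ifs with hk
      · rw [pvCnt_append, ← hc v]
        simp [hxv]
      · have hkl : pvCnt t x < t.length := lt_of_le_of_ne (pvCnt_le_length t x) hk
        rw [pvCnt_set t _ x v hkl, ← hc v]
        have htk : ¬ t[pvCnt t x] ≤ v := by
          have hx : ¬ t[pvCnt t x] ≤ x := by
            have h5 := (pvCnt_iff t hs x (pvCnt t x) hkl).not
            simp only [not_lt] at h5
            exact h5.mpr (le_refl _)
          omega
        simp [hxv, htk]

theorem pvInv_nil : pvInv [] [] :=
  ⟨List.Pairwise.nil, by simp, fun v => by simp [pvCnt, pvMLE]⟩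

theorem pvInv_fold (bs : List Int) (s : List (Int × Int)) (t : List Int) (h : pvInv s t) :
    pvInv (bs.foldl pvDstep s) (bs.foldl pvPstep t) := by
  induction bs generalizing s t with
  | nil => exact h
  | cons b bs ih => exact ih _ _ (pvInv_step _ _ _ h)

theorem pvLength_md (s : List (Int × Int)) (t : List Int) (h : pvInv s t) :
    (t.length : Int) = pvMd s := by
  obtain ⟨hs, hm, hc⟩ := h
  set v := (s.map Prod.fst).foldl max 0 with hv
  have hub : ∀ p ∈ s, p.1 ≤ v := by
    intro p hp
    have h6 := ((PySem.List.le_foldl_max (s.map Prod.fst) 0).2) p.1 (List.mem_map_of_mem hp)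
    simpa [hv] using h6
  have hfil : s.filter (fun p => decide (p.1 ≤ v)) = s :=
    List.filter_eq_self.mpr (fun p hp => by simpa using hub p hp)
  have h1 : pvMLE s v = pvMd s := by rw [pvMLE, hfil]; rfl
  have h2 : pvCnt t v = t.length := by
    rw [pvCnt, List.countP_eq_length]
    intro y hy
    obtain ⟨p, hp, rfl⟩ := hm y hy
    simpa using hub p hp
  rw [← h1, ← hc v, h2]

theorem pvDstep_prefix (l : List Int) (s : List (Int × Int)) :
    ∃ r, l.foldl pvDstep s = s ++ r := by
  induction l generalizing s with
  | nil => exact ⟨[], by simp⟩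
  | cons b l ih =>
    obtain ⟨r, hr⟩ := ih (pvDstep s b)
    refine ⟨(b, 1 + pvMLE s b) :: r, ?_⟩
    rw [List.foldl_cons, hr]
    simp [pvDstep]

theorem pvMd_tmax (bs : List Int) (h2 : 2 ≤ bs.length) :
    pvMd (bs.foldl pvDstep []) = pvTmax (bs.foldl pvDstep []) := by
  match bs, h2 with
  | b0 :: b1 :: bs', _ =>
    have he0 : pvDstep [] b0 = [(b0, 1)] := by simp [pvDstep, pvMLE]
    set d1 := 1 + pvMLE [(b0, (1:Int))] b1 with hd1def
    have hd1 : 1 ≤ d1 := by have := pvMLE_nonneg [(b0, (1:Int))] b1; omega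
    have he1 : pvDstep [(b0, (1:Int))] b1 = [(b0, 1), (b1, d1)] := by simp [pvDstep, hd1def]
    obtain ⟨r, hr⟩ := pvDstep_prefix bs' [(b0, (1:Int)), (b1, d1)]
    have hfold : (b0 :: b1 :: bs').foldl pvDstep [] = [(b0, 1), (b1, d1)] ++ r := by
      simp only [List.foldl_cons, he0, he1, hr]
    rw [hfold]
    simp only [pvMd, pvTmax, List.drop_succ_cons, List.drop_zero, List.cons_append,
      List.foldl_cons, List.nil_append]
    have hm1 : max (max 0 1) d1 = d1 := by omega
    have hm2 : max 0 d1 = d1 := by omega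
    rw [hm1, hm2]

-- ---- B's binary search computes the count of tails ≤ x on a sorted tail list
theorem pvBisect_aux (t : List Int) (x : Int) (hs : t.Pairwise (· ≤ ·)) :
    ∀ (f : Nat) (lo hi : Int), (hi - lo).toNat ≤ f → 0 ≤ lo → lo ≤ hi →
    hi ≤ (t.length : Int) →
    (∀ (j : Nat) (h : j < t.length), (j : Int) < lo → t[j] ≤ x) →
    (∀ (j : Nat) (h : j < t.length), hi ≤ (j : Int) → x < t[j]) →
    minRemoveBisect t x f lo hi = (pvCnt t x : Int) := by
  intro f
  induction f with
  | zero =>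
    intro lo hi hk h0 hlh hhl hlow hhigh
    have hle : lo = hi := by omega
    simp only [minRemoveBisect]
    have hcl : pvCnt t x = lo.toNat := by
      have hub : pvCnt t x ≤ lo.toNat := by
        by_contra hgt
        push Not at hgt
        have hcle : pvCnt t x ≤ t.length := List.countP_le_length
        have hlt : lo.toNat < t.length := by omega
        have hx1 := (pvCnt_iff t hs x lo.toNat hlt).mpr (by omega)
        have hx2 := hhigh lo.toNat hlt (by omega)
        omega
      have hlb : lo.toNat ≤ pvCnt t x := by
        by_contra hgt
        push Not at hgt
        have hlt : pvCnt t x < t.length := by omega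
        have hx1 := hlow (pvCnt t x) hlt (by omega)
        have hx2 := (pvCnt_iff t hs x (pvCnt t x) hlt).mp hx1
        omega
      omega
    omega
  | succ f ih =>
    intro lo hi hk h0 hlh hhl hlow hhigh
    rw [minRemoveBisect]
    by_cases h : lo < hi
    · simp only [h, if_true]
      have h1 := PySem.Int.floordiv_two_mid_bounds (le_of_lt h)
      have h2 : PySem.Int.floordiv (lo + hi) 2 < hi :=
        (PySem.Int.floordiv_lt_iff_lt_mul (by omega)).mpr (by omega)
      set mid := PySem.Int.floordiv (lo + hi) 2 with hmid
      have hmr : 0 ≤ mid ∧ mid < (t.length : Int) := by omega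
      have hmn : mid.toNat < t.length := by omega
      have hget : PySem.List.pyGetD t mid 0 = t[mid.toNat] :=
        PySem.List.pyGetD_eq_getElem t 0 hmr.1 (by omega)
      by_cases hc : PySem.List.pyGetD t mid 0 ≤ x
      · simp only [hc, if_true]
        refine ih (mid + 1) hi (by omega) (by omega) (by omega) hhl ?_ hhigh
        intro j hj hjlo
        have hle : t[j] ≤ t[mid.toNat] := by
          rcases eq_or_lt_of_le (show j ≤ mid.toNat by omega) with he | hl
          · subst he; exact le_refl _
          · exact List.pairwise_iff_getElem.mp hs j mid.toNat hj hmn hl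
        exact le_trans hle (hget ▸ hc)
      · simp only [hc, if_false]
        refine ih lo mid (by omega) h0 (by omega) (by omega) hlow ?_
        intro j hj hjhi
        have hge : t[mid.toNat] ≤ t[j] := by
          rcases eq_or_lt_of_le (show mid.toNat ≤ j by omega) with he | hl
          · subst he; exact le_refl _
          · exact List.pairwise_iff_getElem.mp hs mid.toNat j hmn hj hl
        have hx : x < t[mid.toNat] := by rw [← hget]; omega
        omega
    · simp only [h, if_false]
      have hle : lo = hi := by omega
      have hcl : pvCnt t x = lo.toNat := by
        have hub : pvCnt t x ≤ lo.toNat := by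
          by_contra hgt
          push Not at hgt
          have hcle : pvCnt t x ≤ t.length := List.countP_le_length
          have hlt : lo.toNat < t.length := by omega
          have hx1 := (pvCnt_iff t hs x lo.toNat hlt).mpr (by omega)
          have hx2 := hhigh lo.toNat hlt (by omega)
          omega
        have hlb : lo.toNat ≤ pvCnt t x := by
          by_contra hgt
          push Not at hgt
          have hlt : pvCnt t x < t.length := by omega
          have hx1 := hlow (pvCnt t x) hlt (by omega)
          have hx2 := (pvCnt_iff t hs x (pvCnt t x) hlt).mp hx1
          omega
        omega
      omega

theorem pvBisect_eq (t : List Int) (x : Int) (hs : t.Pairwise (· ≤ ·)) :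
    minRemoveBisect t x t.length 0 (t.length : Int) = (pvCnt t x : Int) := by
  refine pvBisect_aux t x hs t.length 0 (t.length : Int) (by omega) le_rfl (by omega)
    le_rfl ?_ ?_
  · intro j hj hjlo; omega
  · intro j hj hjhi; omega

-- ---- B's fold is the abstract patience fold
theorem pvB_fold (l : List Int) (t : List Int) (hs : t.Pairwise (· ≤ ·)) :
    l.foldl (fun t x =>
      let lo := minRemoveBisect t x t.length 0 (t.length : Int)
      if lo = (t.length : Int) then t ++ [x] else PySem.List.pySetD t lo x) t
    = l.foldl pvPstep t := by
  induction l generalizing t with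
  | nil => rfl
  | cons b l ih =>
    have hstep : (let lo := minRemoveBisect t b t.length 0 (t.length : Int);
        if lo = (t.length : Int) then t ++ [b] else PySem.List.pySetD t lo b) = pvPstep t b := by
      simp only [pvBisect_eq t b hs]
      unfold pvPstep
      by_cases hk : pvCnt t b = t.length
      · simp [hk]
      · have hne : ¬ ((pvCnt t b : Int) = (t.length : Int)) := by exact_mod_cast hk
        simp [hne, hk]
    rw [List.foldl_cons, List.foldl_cons, hstep]
    exact ih _ (pvPstep_pairwise t b hs)

theorem pvB_main (arr : List Int) (n : Int) :
    minRemove_alt arr n = n - (((pvBs arr n).foldl pvPstep []).length : Int) := by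
  unfold minRemove_alt
  have h1 : (pvBs arr n).foldl (fun t x =>
      let lo := minRemoveBisect t x t.length 0 (t.length : Int)
      if lo = (t.length : Int) then t ++ [x] else PySem.List.pySetD t lo x) []
      = (PySem.List.pyRange 0 n 1).foldl (fun t i =>
        let x := PySem.List.pyGetD arr i 0 - i
        let lo := minRemoveBisect t x t.length 0 (t.length : Int)
        if lo = (t.length : Int) then t ++ [x] else PySem.List.pySetD t lo x) [] := by
    rw [pvBs, List.foldl_map]
  rw [← h1, pvB_fold _ _ List.Pairwise.nil]

theorem pvAlt_one (arr : List Int) : minRemove_alt arr 1 = 0 := by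
  unfold minRemove_alt
  have hr : PySem.List.pyRange 0 1 1 = [0] := by decide
  rw [hr]
  simp [minRemoveBisect]

theorem pvA_one (arr : List Int) : minRemove arr 1 = 1 := by
  simp only [minRemove]
  rw [PySem.List.pyRange_one_eq_nil (le_refl (1:Int))]
  simp

-- ---- A's two set-up loops produce replicate n 1
theorem pvFoldSetOnes (L : List Int) : ∀ k, k ≤ L.length →
    (List.range k).foldl (fun L' i => L'.set i (1:Int)) L
      = List.replicate k (1:Int) ++ L.drop k := by
  intro k
  induction k with
  | zero => simp
  | succ k ih =>
    intro hk
    rw [List.range_succ, List.foldl_append, ih (by omega)]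
    simp only [List.foldl_cons, List.foldl_nil]
    have hd : L.drop k = L[k] :: L.drop (k+1) := List.drop_eq_getElem_cons (by omega)
    rw [hd, List.set_append]
    simp only [List.length_replicate, lt_irrefl, if_false, Nat.sub_self, List.set_cons_zero]
    rw [List.replicate_succ']
    simp

theorem pvA_init (arr : List Int) (n : Int) :
    (PySem.List.pyRange 0 n 1).foldl (fun L i => PySem.List.pySetD L i 1)
      ((PySem.List.pyRange 0 n 1).map (fun _ => (0:Int)))
    = List.replicate n.toNat (1:Int) := by
  rw [PySem.List.pyRange_zero n, List.foldl_map, List.map_const']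
  rw [PySem.List.foldl_congr_mem (List.range n.toNat) _
    (fun (L : List Int) (k : Nat) => L.set k (1:Int)) _ (fun acc x _ => by simp)]
  rw [pvFoldSetOnes _ n.toNat (by simp)]
  simp

theorem pvBs_len (arr : List Int) (n : Int) : (pvBs arr n).length = n.toNat := by
  simp [pvBs, PySem.List.length_pyRange_one]

theorem pvBs_getD (arr : List Int) (n : Int) (j : Nat) (hj : j < n.toNat) :
    PySem.List.pyGetD (pvBs arr n) (j:Int) 0
      = PySem.List.pyGetD arr (j:Int) 0 - (j:Int) := by
  rw [PySem.List.pyGetD_eq_getElem _ 0 (by omega) (by rw [pvBs_len]; omega)]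
  have hj' : (j:Int).toNat = j := by omega
  simp only [pvBs, List.getElem_map, hj']
  rw [PySem.List.getElem_pyRange_one]
  simp

theorem pvDfold_len (l : List Int) (s : List (Int × Int)) :
    (l.foldl pvDstep s).length = s.length + l.length := by
  induction l generalizing s with
  | nil => simp
  | cons b l ih => simp [List.foldl_cons, ih, pvDstep]; omega

theorem pvDfold_fst (l : List Int) (s : List (Int × Int)) :
    (l.foldl pvDstep s).map Prod.fst = s.map Prod.fst ++ l := by
  induction l generalizing s with
  | nil => simp
  | cons b l ih => simp [List.foldl_cons, ih, pvDstep]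

theorem pvSf_len (arr : List Int) (n : Int) (i : Nat) (hi : i ≤ (pvBs arr n).length) :
    (pvSf arr n i).length = i := by
  rw [pvSf, pvDfold_len]; simp; omega

theorem pvSf_succ' (arr : List Int) (n : Int) (i : Nat) (hi : i < n.toNat) :
    pvSf arr n (i+1) = pvDstep (pvSf arr n i) (PySem.List.pyGetD (pvBs arr n) (i:Int) 0) := by
  have hlen : i < (pvBs arr n).length := by rw [pvBs_len]; omega
  rw [pvSf, pvSf, List.take_succ_eq_append_getElem hlen, List.foldl_append]
  rw [PySem.List.pyGetD_eq_getElem _ 0 (by omega) (by rw [pvBs_len]; omega)]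
  have hj' : (i:Int).toNat = i := by omega
  simp only [hj']
  simp

theorem pvTmax_dstep (q : List (Int × Int)) (x : Int) (hq : q ≠ []) :
    pvTmax (pvDstep q x) = max (pvTmax q) (1 + pvMLE q x) := by
  rw [pvTmax, pvDstep, List.drop_append_of_le_length (by cases q <;> simp_all),
    List.foldl_append]
  rfl

theorem pvAcc (x : Int) (q : List (Int × Int)) : ∀ (mI : Int),
    q.foldl (fun a p => if p.1 ≤ x then max a (p.2 + 1) else a) (1 + mI)
      = 1 + (q.filter (fun p => decide (p.1 ≤ x))).foldl (fun m p => max m p.2) mI := by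
  induction q with
  | nil => intro mI; rfl
  | cons p q ih =>
    intro mI
    by_cases hp : p.1 ≤ x
    · simp only [List.foldl_cons, List.filter_cons, hp, decide_true, if_true]
      rw [show max (1 + mI) (p.2 + 1) = 1 + max mI p.2 by omega]
      exact ih (max mI p.2)
    · simp only [List.foldl_cons, List.filter_cons, hp, decide_false, if_false]
      exact ih mI

theorem pvAcc0 (x : Int) (q : List (Int × Int)) :
    q.foldl (fun a p => if p.1 ≤ x then max a (p.2 + 1) else a) 1 = 1 + pvMLE q x := by
  have h := pvAcc x q 0
  simpa [pvMLE] using h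

-- the inner j-loop only writes position i; extract its accumulator
theorem pvInnerAux (arr L0 : List Int) (i : Int) (h0 : 0 ≤ i) (hi : i < (L0.length : Int)) :
    ∀ (js : List Int) (a : Int), (∀ j ∈ js, 0 ≤ j ∧ j < i) →
    js.foldl (fun L j =>
      if PySem.List.pyGetD arr i 0 > PySem.List.pyGetD arr j 0 ∧
         i - j ≤ PySem.List.pyGetD arr i 0 - PySem.List.pyGetD arr j 0 then
        PySem.List.pySetD L i (max (PySem.List.pyGetD L i 0) (PySem.List.pyGetD L j 0 + 1))
      else L) (PySem.List.pySetD L0 i a)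
    = PySem.List.pySetD L0 i (js.foldl (fun a j =>
        if PySem.List.pyGetD arr i 0 > PySem.List.pyGetD arr j 0 ∧
           i - j ≤ PySem.List.pyGetD arr i 0 - PySem.List.pyGetD arr j 0 then
          max a (PySem.List.pyGetD L0 j 0 + 1)
        else a) a) := by
  intro js
  induction js with
  | nil => intro a _; rfl
  | cons j js ih =>
    intro a hjs
    obtain ⟨hj0, hji⟩ := hjs j (List.mem_cons_self)
    have hset : PySem.List.pySetD L0 i a = L0.set i.toNat a := PySem.List.pySetD_of_nonneg _ _ h0
    have hgi : PySem.List.pyGetD (PySem.List.pySetD L0 i a) i 0 = a := by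
      rw [hset, PySem.List.pyGetD_eq_getElem _ 0 h0 (by simpa using hi)]
      exact List.getElem_set_self (by simpa using by omega)
    have hgj : PySem.List.pyGetD (PySem.List.pySetD L0 i a) j 0 = PySem.List.pyGetD L0 j 0 := by
      rw [hset, PySem.List.pyGetD_eq_getElem _ 0 hj0 (by simp; omega),
        PySem.List.pyGetD_eq_getElem _ 0 hj0 (by omega)]
      exact List.getElem_set_ne (by omega) _
    have hss : ∀ v, PySem.List.pySetD (PySem.List.pySetD L0 i a) i v
        = PySem.List.pySetD L0 i v := by
      intro v
      rw [hset, PySem.List.pySetD_of_nonneg _ _ h0, PySem.List.pySetD_of_nonneg _ _ h0,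
        List.set_set]
    simp only [List.foldl_cons]
    by_cases hc : PySem.List.pyGetD arr i 0 > PySem.List.pyGetD arr j 0 ∧
        i - j ≤ PySem.List.pyGetD arr i 0 - PySem.List.pyGetD arr j 0
    · simp only [hc, if_true, hgi, hgj, hss]
      exact ih (max a (PySem.List.pyGetD L0 j 0 + 1))
        (fun j' hj' => hjs j' (List.mem_cons_of_mem _ hj'))
    · simp only [hc, if_false]
      exact ih a (fun j' hj' => hjs j' (List.mem_cons_of_mem _ hj'))

theorem pvQ1 (arr : List Int) (n : Int) (i j : Nat) (hj : j < i) (hi : i ≤ n.toNat) :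
    (PySem.List.pyGetD (pvSf arr n i) (j:Int) ((0:Int),(0:Int))).1
      = PySem.List.pyGetD (pvBs arr n) (j:Int) 0 := by
  have hql : (pvSf arr n i).length = i := pvSf_len arr n i (by rw [pvBs_len]; omega)
  rw [PySem.List.pyGetD_eq_getElem _ _ (by omega) (by rw [hql]; omega)]
  rw [PySem.List.pyGetD_eq_getElem _ _ (by omega) (by rw [pvBs_len]; omega)]
  have hmap : (pvSf arr n i).map Prod.fst = (pvBs arr n).take i := by
    rw [pvSf, pvDfold_fst]; simp
  have h1 : ((pvSf arr n i).map Prod.fst)[(j:Int).toNat]'(by simp [hql]; omega)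
      = ((pvBs arr n).take i)[(j:Int).toNat]'(by rw [List.length_take, pvBs_len]; omega) :=
    List.getElem_of_eq hmap _
  rw [List.getElem_map, List.getElem_take] at h1
  exact h1

theorem pvQ2 (arr : List Int) (n : Int) (i j : Nat) (hj : j < i) (hi : i ≤ n.toNat)
    (rest : List Int) :
    PySem.List.pyGetD ((pvSf arr n i).map Prod.snd ++ (1:Int) :: rest) (j:Int) 0
      = (PySem.List.pyGetD (pvSf arr n i) (j:Int) ((0:Int),(0:Int))).2 := by
  have hql : (pvSf arr n i).length = i := pvSf_len arr n i (by rw [pvBs_len]; omega)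
  rw [PySem.List.pyGetD_eq_getElem _ _ (by omega) (by simp [hql]; omega)]
  rw [PySem.List.pyGetD_eq_getElem _ _ (by omega) (by rw [hql]; omega)]
  rw [List.getElem_append_left (by simp [hql]; omega)]
  rw [List.getElem_map]

theorem pvInnerAcc (arr : List Int) (n : Int) (i : Nat) (hi : i < n.toNat)
    (rest L0 : List Int)
    (hL0 : L0 = (pvSf arr n i).map Prod.snd ++ (1:Int) :: rest) :
    (PySem.List.pyRange 0 (i:Int) 1).foldl (fun a j =>
        if PySem.List.pyGetD arr (i:Int) 0 > PySem.List.pyGetD arr j 0 ∧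
           (i:Int) - j ≤ PySem.List.pyGetD arr (i:Int) 0 - PySem.List.pyGetD arr j 0 then
          max a (PySem.List.pyGetD L0 j 0 + 1)
        else a) 1
      = 1 + pvMLE (pvSf arr n i) (PySem.List.pyGetD (pvBs arr n) (i:Int) 0) := by
  have hql : (pvSf arr n i).length = i := pvSf_len arr n i (by rw [pvBs_len]; omega)
  have hcong : ∀ (a : Int), ∀ j ∈ PySem.List.pyRange 0 (i:Int) 1,
      (if PySem.List.pyGetD arr (i:Int) 0 > PySem.List.pyGetD arr j 0 ∧
           (i:Int) - j ≤ PySem.List.pyGetD arr (i:Int) 0 - PySem.List.pyGetD arr j 0 then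
        max a (PySem.List.pyGetD L0 j 0 + 1) else a)
      = (if (PySem.List.pyGetD (pvSf arr n i) j ((0:Int),(0:Int))).1
            ≤ PySem.List.pyGetD (pvBs arr n) (i:Int) 0 then
          max a ((PySem.List.pyGetD (pvSf arr n i) j ((0:Int),(0:Int))).2 + 1) else a) := by
    intro a j hj
    obtain ⟨hj0, hji⟩ := PySem.List.mem_pyRange_one.mp hj
    have hjj : ((j.toNat : Nat) : Int) = j := by omega
    have hjn : j.toNat < i := by omega
    have hfst : (PySem.List.pyGetD (pvSf arr n i) j ((0:Int),(0:Int))).1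
        = PySem.List.pyGetD arr j 0 - j := by
      rw [← hjj, pvQ1 arr n i j.toNat hjn (by omega), pvBs_getD arr n j.toNat (by omega)]
    have hxv : PySem.List.pyGetD (pvBs arr n) (i:Int) 0
        = PySem.List.pyGetD arr (i:Int) 0 - (i:Int) := pvBs_getD arr n i hi
    have hiff : (PySem.List.pyGetD arr (i:Int) 0 > PySem.List.pyGetD arr j 0 ∧
           (i:Int) - j ≤ PySem.List.pyGetD arr (i:Int) 0 - PySem.List.pyGetD arr j 0)
        ↔ (PySem.List.pyGetD (pvSf arr n i) j ((0:Int),(0:Int))).1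
            ≤ PySem.List.pyGetD (pvBs arr n) (i:Int) 0 := by
      rw [hfst, hxv]
      constructor
      · intro h; omega
      · intro h; constructor <;> omega
    have hval : PySem.List.pyGetD L0 j 0
        = (PySem.List.pyGetD (pvSf arr n i) j ((0:Int),(0:Int))).2 := by
      rw [hL0, ← hjj, pvQ2 arr n i j.toNat hjn (by omega)]
    rw [if_congr hiff (by rw [hval]) rfl]
  rw [PySem.List.foldl_congr_mem _ _ _ _ hcong]
  have hlen : (i : Int) = PySem.List.len (pvSf arr n i) := by
    simp [PySem.List.len, hql]
  rw [hlen, PySem.List.foldl_pyRange_zero_pyGetD (pvSf arr n i) ((0:Int),(0:Int))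
    (fun a p => if p.1 ≤ PySem.List.pyGetD (pvBs arr n) (PySem.List.len (pvSf arr n i)) 0
      then max a (p.2 + 1) else a) 1]
  rw [← hlen]
  exact pvAcc0 _ _

theorem pvA_step (arr : List Int) (n : Int) (i : Nat) (h1i : 1 ≤ i) (hi : i < n.toNat) :
    (fun (st : List Int × Int) (iI : Int) =>
      let L := (PySem.List.pyRange 0 iI 1).foldl (fun L j =>
        if PySem.List.pyGetD arr iI 0 > PySem.List.pyGetD arr j 0 ∧
           iI - j ≤ PySem.List.pyGetD arr iI 0 - PySem.List.pyGetD arr j 0 then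
          PySem.List.pySetD L iI (max (PySem.List.pyGetD L iI 0) (PySem.List.pyGetD L j 0 + 1))
        else L) st.1
      (L, max st.2 (PySem.List.pyGetD L iI 0)))
      ((pvSf arr n i).map Prod.snd ++ List.replicate (n.toNat - i) (1:Int), pvTmax (pvSf arr n i))
      (i:Int)
    = ((pvSf arr n (i+1)).map Prod.snd ++ List.replicate (n.toNat - (i+1)) (1:Int),
        pvTmax (pvSf arr n (i+1))) := by
  dsimp only
  have hql : (pvSf arr n i).length = i := pvSf_len arr n i (by rw [pvBs_len]; omega)
  have hrepl : List.replicate (n.toNat - i) (1:Int)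
      = (1:Int) :: List.replicate (n.toNat - i - 1) (1:Int) := by
    conv_lhs => rw [show n.toNat - i = (n.toNat - i - 1) + 1 by omega]
    rw [List.replicate_succ]
  rw [hrepl]
  have hL0len : ((pvSf arr n i).map Prod.snd
      ++ (1:Int) :: List.replicate (n.toNat - i - 1) (1:Int)).length = n.toNat := by
    simp [hql]
    omega
  have hnotlt : ¬ i < ((pvSf arr n i).map Prod.snd).length := by simp [hql]
  have htoNat : ((i:Int)).toNat = i := by omega
  have hset1 : PySem.List.pySetD ((pvSf arr n i).map Prod.snd
      ++ (1:Int) :: List.replicate (n.toNat - i - 1) (1:Int)) (i:Int) 1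
      = (pvSf arr n i).map Prod.snd ++ (1:Int) :: List.replicate (n.toNat - i - 1) (1:Int) := by
    rw [PySem.List.pySetD_of_nonneg _ _ (by omega), htoNat, List.set_append, if_neg hnotlt]
    simp [hql]
  have hinner := pvInnerAux arr ((pvSf arr n i).map Prod.snd
      ++ (1:Int) :: List.replicate (n.toNat - i - 1) (1:Int)) (i:Int) (by omega)
      (by rw [hL0len]; omega) (PySem.List.pyRange 0 (i:Int) 1) 1
      (fun j hj => ⟨(PySem.List.mem_pyRange_one.mp hj).1, (PySem.List.mem_pyRange_one.mp hj).2⟩)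
  rw [hset1] at hinner
  rw [pvInnerAcc arr n i hi (List.replicate (n.toNat - i - 1) (1:Int)) _ rfl] at hinner
  rw [hinner]
  have hLnew : PySem.List.pySetD ((pvSf arr n i).map Prod.snd
      ++ (1:Int) :: List.replicate (n.toNat - i - 1) (1:Int)) (i:Int)
      (1 + pvMLE (pvSf arr n i) (PySem.List.pyGetD (pvBs arr n) (i:Int) 0))
      = (pvSf arr n (i+1)).map Prod.snd ++ List.replicate (n.toNat - (i+1)) (1:Int) := by
    rw [PySem.List.pySetD_of_nonneg _ _ (by omega), htoNat, List.set_append, if_neg hnotlt]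
    rw [pvSf_succ' arr n i hi]
    simp only [pvDstep, List.map_append, List.map_cons, List.map_nil, List.length_map, hql,
      Nat.sub_self, List.set_cons_zero, List.append_assoc, List.cons_append, List.nil_append]
    rw [show n.toNat - i - 1 = n.toNat - (i+1) by omega]
  have hgetd : PySem.List.pyGetD (PySem.List.pySetD ((pvSf arr n i).map Prod.snd
      ++ (1:Int) :: List.replicate (n.toNat - i - 1) (1:Int)) (i:Int)
      (1 + pvMLE (pvSf arr n i) (PySem.List.pyGetD (pvBs arr n) (i:Int) 0))) (i:Int) 0
      = 1 + pvMLE (pvSf arr n i) (PySem.List.pyGetD (pvBs arr n) (i:Int) 0) := by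
    rw [PySem.List.pySetD_of_nonneg _ _ (by omega), htoNat]
    rw [PySem.List.pyGetD_eq_getElem _ 0 (by omega) (by simp [hL0len]; omega)]
    simp only [htoNat]
    exact List.getElem_set_self _
  have htm : max (pvTmax (pvSf arr n i))
      (1 + pvMLE (pvSf arr n i) (PySem.List.pyGetD (pvBs arr n) (i:Int) 0))
      = pvTmax (pvSf arr n (i+1)) := by
    rw [pvSf_succ' arr n i hi, pvTmax_dstep _ _ ?_]
    intro h
    apply_fun List.length at h
    rw [hql] at h
    simp at h
    omega
  rw [Prod.mk.injEq]
  exact ⟨hLnew, by rw [hgetd, htm]⟩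

theorem pvA_outer (arr : List Int) (n : Int) (h1 : 1 ≤ n) :
    ∀ k : Nat, (k : Int) ≤ n - 1 →
    (PySem.List.pyRange 1 (1 + (k:Int)) 1).foldl (fun (st : List Int × Int) i =>
      let L := (PySem.List.pyRange 0 i 1).foldl (fun L j =>
        if PySem.List.pyGetD arr i 0 > PySem.List.pyGetD arr j 0 ∧
           i - j ≤ PySem.List.pyGetD arr i 0 - PySem.List.pyGetD arr j 0 then
          PySem.List.pySetD L i (max (PySem.List.pyGetD L i 0) (PySem.List.pyGetD L j 0 + 1))
        else L) st.1
      (L, max st.2 (PySem.List.pyGetD L i 0))) (List.replicate n.toNat (1:Int), 0)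
    = ((pvSf arr n (k+1)).map Prod.snd ++ List.replicate (n.toNat - (k+1)) (1:Int),
        pvTmax (pvSf arr n (k+1))) := by
  intro k
  induction k with
  | zero =>
    intro _
    have hr : PySem.List.pyRange 1 (1 + (0:Nat)) 1 = [] :=
      PySem.List.pyRange_one_eq_nil (by omega)
    rw [hr, List.foldl_nil]
    have hsf : pvSf arr n 1 = [(PySem.List.pyGetD (pvBs arr n) ((0:Nat):Int) 0, 1)] := by
      rw [show (1:Nat) = 0 + 1 from rfl, pvSf_succ' arr n 0 (by omega)]
      simp [pvSf, pvDstep, pvMLE]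
    rw [hsf]
    rw [Prod.mk.injEq]
    refine ⟨?_, rfl⟩
    show List.replicate n.toNat (1:Int) = [(1:Int)] ++ List.replicate (n.toNat - 1) 1
    rw [show n.toNat = (n.toNat - 1) + 1 by omega, List.replicate_succ]
    simp
  | succ k ih =>
    intro hk
    have hkk : (k : Int) ≤ n - 1 := by push_cast at hk ⊢; omega
    have hrange : PySem.List.pyRange 1 (1 + ((k+1:Nat):Int)) 1
        = PySem.List.pyRange 1 (1 + (k:Int)) 1 ++ [1 + (k:Int)] := by
      rw [show (1 + ((k+1:Nat):Int)) = (1 + (k:Int)) + 1 by push_cast; ring]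
      rw [PySem.List.pyRange_one_succ_right (by omega)]
    rw [hrange, List.foldl_append, ih hkk, List.foldl_cons, List.foldl_nil]
    rw [show (1 + (k:Int)) = ((k+1:Nat):Int) by push_cast; ring]
    exact pvA_step arr n (k+1) (by omega) (by push_cast at hk; omega)

theorem pvA_main (arr : List Int) (n : Int) (h1 : 1 ≤ n) :
    minRemove arr n = n - pvTmax ((pvBs arr n).foldl pvDstep []) := by
  simp only [minRemove]
  rw [pvA_init arr n]
  have hpr : PySem.List.pyRange 1 n 1
      = PySem.List.pyRange 1 (1 + ((n.toNat - 1 : Nat):Int)) 1 := by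
    congr 1
    omega
  rw [hpr, pvA_outer arr n h1 (n.toNat - 1) (by omega)]
  rw [show (n.toNat - 1) + 1 = n.toNat by omega]
  rw [pvSf, ← pvBs_len arr n, List.take_length]

theorem pvLen_eq (bs : List Int) :
    ((bs.foldl pvPstep []).length : Int) = pvMd (bs.foldl pvDstep []) :=
  pvLength_md _ _ (pvInv_fold bs [] [] pvInv_nil)

-- ===== VERDICT (by name: the statement is the Claim_ definition above) =====
theorem minRemove_spec : Claim_unchanged_minRemove := by
  intro arr n _hdom hpre hnd
  have hn1 : n ≠ 1 := fun h => hnd h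
  by_cases h0 : n ≤ 0
  · have e1 : PySem.List.pyRange 0 n 1 = [] := PySem.List.pyRange_one_eq_nil (by omega)
    have e2 : PySem.List.pyRange 1 n 1 = [] := PySem.List.pyRange_one_eq_nil (by omega)
    simp [minRemove, minRemove_alt, e1, e2]
  · have h2 : 2 ≤ n := by omega
    rw [pvA_main arr n (by omega), pvB_main arr n, pvLen_eq (pvBs arr n),
      pvMd_tmax (pvBs arr n) (by rw [pvBs_len]; omega)]

theorem minRemove_changed : Claim_changed_minRemove := by
  unfold Claim_changed_minRemove
  exact ⟨by decide, by decide, by decide, by decide, pvAlt_one _, by decide⟩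

theorem minRemove_tight : Claim_exact_minRemove := by
  intro arr n _hdom _hpre hD
  have hn : n = 1 := hD
  subst hn
  rw [pvA_one arr, pvAlt_one arr]
  decide
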